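-- pv_equiv track=rewrite | github.com/nlongname/Project_Euler | 120.py | max_remainder
-- ===== SOURCE A (Python) =====
-- def max_remainder(a:int):
--     remainders = []
--     a_sq = a**2
--     # so all you need to do is find 2*a % a^2
--     temp = 2*a % a_sq
--     while temp not in remainders:
--         remainders.append(temp)
--         # then keep adding 4*a (mod a^2) until it repeats (it always will)
--         temp = remainders[-1] + 4*a
--         temp %= a_sq
--     return max(remainders) # and take the max
-- ===== SOURCE B (Python) =====
-- def max_remainder(a: int):
--     # Closed form: the remainders are exactly the residue class of 2a modulo
--     # g = |a|*gcd(4,|a|) inside [0, a^2); the largest one is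
--     # n*(n-1) for odd n=|a| and n*(n-2) for even n.
--     n = abs(a)
--     return n * (n - 1) if n % 2 == 1 else n * (n - 2)
-- ===== Notes on version B (the rewrite author's own statement) =====
-- stated objective: faster
-- what changed: Replaced the simulate-until-repeat loop with list membership scans by the closed form max = n*(n-1) for odd n=|a|, n*(n-2) for even n (the remainders form one full residue class mod |a|*gcd(4,|a|) in [0,a^2)).
import Mathlib
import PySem

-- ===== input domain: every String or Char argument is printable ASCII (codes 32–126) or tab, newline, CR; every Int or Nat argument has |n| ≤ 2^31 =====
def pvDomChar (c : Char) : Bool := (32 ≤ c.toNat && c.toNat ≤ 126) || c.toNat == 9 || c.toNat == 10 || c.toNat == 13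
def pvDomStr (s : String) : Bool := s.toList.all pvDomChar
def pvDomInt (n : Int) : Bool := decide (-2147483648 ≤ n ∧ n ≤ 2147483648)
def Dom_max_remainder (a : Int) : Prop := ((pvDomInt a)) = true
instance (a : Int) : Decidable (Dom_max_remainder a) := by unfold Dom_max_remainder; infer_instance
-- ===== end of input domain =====

-- B replaces A's simulate-until-repeat loop (a list-membership scan per step) by the
-- closed form n*(n-1) for odd n = |a| and n*(n-2) for even n; no observable mutation.

-- ===== PORT A =====
-- A's while loop; the fuel argument only makes the recursion total (the loop itself
-- stops once a remainder repeats, so a.natAbs^2 + 1 steps always suffice, proved below)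
def pvLoopA (a asq : Int) : Nat → Int → List Int → List Int
  | 0, _, rem => rem
  | fuel + 1, temp, rem =>
    if temp ∈ rem then rem
    else pvLoopA a asq fuel (PySem.Int.mod (temp + 4 * a) asq) (rem ++ [temp])

def max_remainder (a : Int) : Int :=
  let a_sq := a ^ 2
  let temp := PySem.Int.mod (2 * a) a_sq
  let remainders := pvLoopA a a_sq (a.natAbs * a.natAbs + 1) temp []
  -- max(remainders): the list is nonempty whenever a ≠ 0 (Pre_), so getD 0 is a pure totality guard
  (PySem.List.max? remainders (fun x => x)).getD 0

-- ===== PORT B =====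
def max_remainder_alt (a : Int) : Int :=
  let n : Int := |a|
  if PySem.Int.mod n 2 = 1 then n * (n - 1) else n * (n - 2)

-- ===== PRECONDITION & SPEC =====
-- a = 0 makes A compute 2*a % a**2 with a**2 = 0 and raise ZeroDivisionError
def Pre_max_remainder (a : Int) : Prop := a ≠ 0
instance (a : Int) : Decidable (Pre_max_remainder a) := by unfold Pre_max_remainder; infer_instance
def pvWitness_max_remainder : Int := 6

def Spec_max_remainder (a : Int) (out : Int) : Prop := out = max_remainder_alt a
instance (a : Int) (out : Int) : Decidable (Spec_max_remainder a out) := by unfold Spec_max_remainder; infer_instance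

-- ===== CLAIM (what is proved, stated in full; the proofs are below) =====
def Claim_equal_max_remainder : Prop := ∀ (a : Int), Dom_max_remainder a → Pre_max_remainder a → Spec_max_remainder a (max_remainder a)

-- ===== LEMMAS AND PROOFS =====
-- The remainder sequence is t k = (2a + 4ak) mod a²; with n = |a|, d = gcd 4 n, the
-- loop collects exactly [t 0, …, t (p-1)] for p = n/d (pvLoop_run), these are exactly
-- the p residues ≡ 2a (mod g), g = n·d, in [0, a²) (pvT_repr + pigeonhole in pv_max),
-- whose maximum 2a mod g + a² - g equals B's closed form in each case of n mod 4.

def pvT (a : Int) (k : Nat) : Int := (2 * a + 4 * a * k) % (a ^ 2)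
def pvP (a : Int) : Nat := a.natAbs / Nat.gcd 4 a.natAbs
def pvG (a : Int) : Int := (a.natAbs : Int) * (Nat.gcd 4 a.natAbs : Int)

theorem pv_sq_eq (a : Int) : a ^ 2 = (a.natAbs : Int) * (a.natAbs : Int) := by
  rw [sq, ← Int.natAbs_mul_self]; push_cast; ring

theorem pv_sq_pos (a : Int) (ha : a ≠ 0) : 0 < a ^ 2 := by positivity

theorem pvT_step (a : Int) (k : Nat) :
    (pvT a k + 4 * a) % (a ^ 2) = pvT a (k + 1) := by
  unfold pvT
  push_cast
  conv_rhs => rw [show 2*a + 4*a*((k:Int)+1) = (2*a + 4*a*(k:Int)) + 4*a by ring]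
  rw [Int.add_emod, Int.emod_emod_of_dvd _ dvd_rfl, ← Int.add_emod]

theorem pvG_dvd_sq (a : Int) : pvG a ∣ a ^ 2 := by
  unfold pvG; rw [pv_sq_eq]
  exact_mod_cast Int.natCast_dvd_natCast.mpr
    (Nat.mul_dvd_mul_left a.natAbs (Nat.gcd_dvd_right 4 a.natAbs))

theorem pvG_dvd_4a (a : Int) : pvG a ∣ 4 * a := by
  have h1 : pvG a ∣ ((4 * a.natAbs : Nat) : Int) := by
    unfold pvG
    exact_mod_cast Int.natCast_dvd_natCast.mpr
      (by rw [Nat.mul_comm 4]; exact Nat.mul_dvd_mul_left a.natAbs (Nat.gcd_dvd_left 4 a.natAbs))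
  have h2 : ((4 * a.natAbs : Nat) : Int) ∣ 4 * a := by
    have h3 : ((4 * a).natAbs : Int) ∣ 4 * a := Int.natAbs_dvd.mpr dvd_rfl
    simpa [Int.natAbs_mul] using h3
  exact h1.trans h2

theorem pv_m_eq_gp (a : Int) : a ^ 2 = pvG a * (pvP a : Int) := by
  unfold pvG pvP; rw [pv_sq_eq]
  have h : a.natAbs * Nat.gcd 4 a.natAbs * (a.natAbs / Nat.gcd 4 a.natAbs)
      = a.natAbs * a.natAbs := by
    rw [Nat.mul_assoc, Nat.mul_div_cancel' (Nat.gcd_dvd_right 4 a.natAbs)]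
  exact_mod_cast h.symm

theorem pvP_pos (a : Int) (ha : a ≠ 0) : 0 < pvP a :=
  Nat.div_pos (Nat.le_of_dvd (Int.natAbs_pos.mpr ha) (Nat.gcd_dvd_right 4 a.natAbs))
    (Nat.gcd_pos_of_pos_left _ (by norm_num))

theorem pvG_pos (a : Int) (ha : a ≠ 0) : 0 < pvG a := by
  have h1 : 0 < a.natAbs := Int.natAbs_pos.mpr ha
  have h2 : 0 < Nat.gcd 4 a.natAbs := Nat.gcd_pos_of_pos_left _ (by norm_num)
  unfold pvG; positivity

theorem pvT_class (a : Int) (k : Nat) :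
    pvT a k % pvG a = (2 * a) % pvG a := by
  unfold pvT
  rw [Int.emod_emod_of_dvd _ (pvG_dvd_sq a)]
  obtain ⟨e, he⟩ := (pvG_dvd_4a a).mul_right (k : Int)
  rw [show 2 * a + 4 * a * (k:Int) = 2 * a + pvG a * e by rw [← he]]
  simp [Int.add_mul_emod_self_left]

theorem pvT_distinct (a : Int) (ha : a ≠ 0) (i j : Nat) (hij : i < j) (hj : j < pvP a) :
    pvT a i ≠ pvT a j := by
  intro h
  have hm : (a ^ 2) ∣ (4 * a * ((j : Int) - i)) := by
    have h2 : (2 * a + 4 * a * (j:Int)) % a ^ 2 = (2 * a + 4 * a * (i:Int)) % a ^ 2 := h.symm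
    have h5 := Int.emod_eq_emod_iff_emod_sub_eq_zero.mp h2
    have h4 : (4 * a * ((j:Int) - i)) % a ^ 2 = 0 := by
      rw [show 4 * a * ((j:Int) - i) = (2 * a + 4 * a * (j:Int)) - (2 * a + 4 * a * (i:Int)) by ring]
      exact h5
    exact Int.dvd_of_emod_eq_zero h4
  set n := a.natAbs with hn
  set d := Nat.gcd 4 n with hd
  have hn0 : 0 < n := Int.natAbs_pos.mpr ha
  have hd0 : 0 < d := Nat.gcd_pos_of_pos_left _ (by norm_num)
  have hk : 0 < j - i := by omega
  have hnat : n * n ∣ 4 * n * (j - i) := by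
    have h6 := Int.natAbs_dvd_natAbs.mpr hm
    have hcast : ((j:Int) - i).natAbs = j - i := by omega
    simpa [Int.natAbs_mul, Int.natAbs_pow, hcast, pv_sq_eq, ← hn] using h6
  have hn4 : n ∣ 4 * (j - i) := by
    have h7 : n * n ∣ n * (4 * (j - i)) := by rwa [show n * (4*(j-i)) = 4*n*(j-i) by ring]
    exact (mul_dvd_mul_iff_left hn0.ne').mp h7
  -- n = d * p, 4 = d * q, coprime q p  ⇒ p ∣ (j - i)
  have hq : d * (4 / d) = 4 := Nat.mul_div_cancel' (Nat.gcd_dvd_left 4 n)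
  have hnp : d * pvP a = n := by
    unfold pvP; rw [← hn, ← hd]; exact Nat.mul_div_cancel' (Nat.gcd_dvd_right 4 n)
  have hcop : Nat.Coprime (4 / d) (pvP a) := by
    unfold pvP; rw [← hn, ← hd]
    exact Nat.coprime_div_gcd_div_gcd hd0
  have hpk : pvP a ∣ (j - i) := by
    have h8 : d * pvP a ∣ d * ((4 / d) * (j - i)) := by
      rw [hnp, show d * ((4/d) * (j-i)) = (d * (4/d)) * (j - i) by ring, hq]
      exact hn4
    have h9 : pvP a ∣ (4 / d) * (j - i) := (mul_dvd_mul_iff_left hd0.ne').mp h8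
    exact (Nat.Coprime.dvd_of_dvd_mul_left (Nat.Coprime.symm hcop) h9)
  have := Nat.le_of_dvd hk hpk
  omega

theorem pvT_cycle (a : Int) : pvT a (pvP a) = pvT a 0 := by
  unfold pvT
  apply Int.emod_eq_emod_iff_emod_sub_eq_zero.mpr
  rw [show (2*a + 4*a*(pvP a : Int)) - (2*a + 4*a*((0:Nat):Int)) = 4*a*(pvP a : Int) by push_cast; ring]
  apply Int.emod_eq_zero_of_dvd
  set n := a.natAbs with hn
  set d := Nat.gcd 4 n with hd
  set q := 4 / d with hqdef
  have hq4 : d * q = 4 := Nat.mul_div_cancel' (Nat.gcd_dvd_left 4 n)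
  have hnp : d * pvP a = n := by
    unfold pvP; rw [← hn, ← hd]; exact Nat.mul_div_cancel' (Nat.gcd_dvd_right 4 n)
  have hnat : n * n ∣ 4 * n * pvP a := by
    refine ⟨q, ?_⟩
    have h1 : 4 * n * pvP a = (d * q) * n * pvP a := by rw [hq4]
    have h2 : (d * q) * n * pvP a = n * (d * pvP a) * q := by ring
    rw [h1, h2, hnp]
  apply Int.natAbs_dvd_natAbs.mp
  simpa [Int.natAbs_mul, Int.natAbs_pow, pv_sq_eq, ← hn,
    show ((a:Int)^2).natAbs = n * n from by rw [pv_sq_eq]; exact_mod_cast rfl] using hnat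

-- the loop computes exactly [t 0, …, t (p-1)]

theorem pvLoop_run (a : Int) (ha : a ≠ 0) :
    ∀ (c j : Nat), j + c = pvP a → ∀ fuel, c + 1 ≤ fuel →
      pvLoopA a (a ^ 2) fuel (pvT a j) ((List.range j).map (pvT a))
        = (List.range (pvP a)).map (pvT a) := by
  intro c
  induction c with
  | zero =>
    intro j hj fuel hf
    obtain ⟨f, rfl⟩ : ∃ f, fuel = f + 1 := ⟨fuel - 1, by omega⟩
    have hj' : j = pvP a := by omega
    subst hj'
    have hmem : pvT a (pvP a) ∈ (List.range (pvP a)).map (pvT a) := by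
      rw [pvT_cycle a]
      exact List.mem_map_of_mem (List.mem_range.mpr (pvP_pos a ha))
    simp [pvLoopA, hmem]
  | succ c ih =>
    intro j hj fuel hf
    obtain ⟨f, rfl⟩ : ∃ f, fuel = f + 1 := ⟨fuel - 1, by omega⟩
    have hjp : j < pvP a := by omega
    have hnmem : pvT a j ∉ (List.range j).map (pvT a) := by
      intro hmem
      obtain ⟨i, hi, hti⟩ := List.mem_map.mp hmem
      exact pvT_distinct a ha i j (List.mem_range.mp hi) hjp hti
    have hmod : PySem.Int.mod (pvT a j + 4 * a) (a ^ 2) = pvT a (j + 1) := by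
      rw [PySem.Int.mod_eq_emod_of_pos (by positivity), pvT_step]
    have happ : (List.range j).map (pvT a) ++ [pvT a j] = (List.range (j+1)).map (pvT a) := by
      rw [List.range_succ, List.map_append]; rfl
    simp only [pvLoopA, if_neg hnmem, hmod, happ]
    exact ih (j + 1) (by omega) f (by omega)

theorem pvT_repr (a : Int) (ha : a ≠ 0) (k : Nat) :
    ∃ j < pvP a, pvT a k = 2 * a % pvG a + pvG a * j := by
  set g := pvG a with hgdef
  set r0 := 2 * a % g with hr0def
  have hg : 0 < g := pvG_pos a ha
  have hr0 : 0 ≤ r0 ∧ r0 < g := ⟨Int.emod_nonneg _ hg.ne', Int.emod_lt_of_pos _ hg⟩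
  have hcl : pvT a k % g = r0 := pvT_class a k
  have hdvd : g ∣ pvT a k - r0 := by
    apply Int.dvd_of_emod_eq_zero
    rw [Int.sub_emod, hcl, hr0def, Int.emod_emod_of_dvd _ dvd_rfl, sub_self, Int.zero_emod]
  obtain ⟨e, he⟩ := hdvd
  have htk0 : 0 ≤ pvT a k := Int.emod_nonneg _ (pv_sq_pos a ha).ne'
  have htkm : pvT a k < a ^ 2 := Int.emod_lt_of_pos _ (pv_sq_pos a ha)
  have hgp : a ^ 2 = g * (pvP a : Int) := pv_m_eq_gp a
  have he0 : 0 ≤ e := by nlinarith [hr0.1, hr0.2]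
  have hep : e < (pvP a : Int) := by nlinarith [hr0.1, hr0.2]
  refine ⟨e.toNat, by omega, ?_⟩
  rw [Int.toNat_of_nonneg he0]
  linarith [he]

theorem pvT_inj (a : Int) (ha : a ≠ 0) (i j : Nat) (hi : i < pvP a) (hj : j < pvP a)
    (h : pvT a i = pvT a j) : i = j := by
  rcases lt_trichotomy i j with hlt | heq | hgt
  · exact absurd h (pvT_distinct a ha i j hlt hj)
  · exact heq
  · exact absurd h.symm (pvT_distinct a ha j i hgt hi)

theorem pv_max (a : Int) (ha : a ≠ 0) :
    PySem.List.max? ((List.range (pvP a)).map (pvT a)) (fun x => x)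
      = some (2 * a % pvG a + (a ^ 2 - pvG a)) := by
  set g := pvG a with hgdef
  set r0 := 2 * a % g with hr0def
  set p := pvP a with hpdef
  set L := (List.range p).map (pvT a) with hLdef
  set M := r0 + (a ^ 2 - g) with hMdef
  have hg : 0 < g := pvG_pos a ha
  have hp : 0 < p := pvP_pos a ha
  have hgp : a ^ 2 = g * (p : Int) := pv_m_eq_gp a
  have hMr : M = r0 + g * ((p : Int) - 1) := by rw [hMdef, hgp]; ring
  -- upper bound
  have hub : ∀ x ∈ L, x ≤ M := by
    intro x hx
    obtain ⟨k, _, rfl⟩ := List.mem_map.mp hx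
    obtain ⟨j, hjp, hrepr⟩ := pvT_repr a ha k
    rw [hrepr, hMr]
    have hj1 : (j : Int) ≤ (p : Int) - 1 := by
      have : (j : Int) < p := by exact_mod_cast hjp
      omega
    nlinarith
  -- membership of M via pigeonhole
  have hMmem : M ∈ L := by
    have hnd : L.Nodup := by
      refine List.Nodup.map_on ?_ (List.nodup_range)
      intro i hi j hj hij
      exact pvT_inj a ha i j (List.mem_range.mp hi) (List.mem_range.mp hj) hij
    have hsub : L.toFinset ⊆ (Finset.range p).image (fun j : Nat => r0 + g * j) := by
      intro x hx
      obtain ⟨k, _, rfl⟩ := List.mem_map.mp (List.mem_toFinset.mp hx)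
      obtain ⟨j, hjp, hrepr⟩ := pvT_repr a ha k
      exact Finset.mem_image.mpr ⟨j, Finset.mem_range.mpr hjp, hrepr.symm⟩
    have hcard : ((Finset.range p).image (fun j : Nat => r0 + g * j)).card ≤ L.toFinset.card := by
      calc ((Finset.range p).image (fun j : Nat => r0 + g * j)).card
          ≤ p := le_trans Finset.card_image_le (le_of_eq (Finset.card_range p))
        _ = L.toFinset.card := by
            rw [List.toFinset_card_of_nodup hnd, hLdef, List.length_map, List.length_range]
    have heq := Finset.eq_of_subset_of_card_le hsub hcard
    have hMF : M ∈ (Finset.range p).image (fun j : Nat => r0 + g * j) := by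
      refine Finset.mem_image.mpr ⟨p - 1, Finset.mem_range.mpr (by omega), ?_⟩
      rw [hMr]
      congr 1
      congr 1
      push_cast [Nat.cast_sub hp]
      ring
    rw [← heq] at hMF
    exact List.mem_toFinset.mp hMF
  -- conclude
  have hne : L ≠ [] := by
    rw [hLdef]
    simp [List.range_eq_nil, hp.ne']
  obtain ⟨m', hm'⟩ : ∃ m', PySem.List.max? L (fun x => x) = some m' := by
    rcases hopt : PySem.List.max? L (fun x => x) with _ | m'
    · exact absurd ((PySem.List.max?_eq_none_iff L (fun x => x)).mp hopt) hne
    · exact ⟨m', rfl⟩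
  have hmem := PySem.List.max?_mem hm'
  have hmax := PySem.List.max?_isMax hm'
  have h1 : m' ≤ M := hub m' hmem
  have h2 : M ≤ m' := hmax M hMmem
  rw [hm', le_antisymm h1 h2]


theorem pv_A_eq (a : Int) (ha : a ≠ 0) :
    max_remainder a = 2 * a % pvG a + (a ^ 2 - pvG a) := by
  have ht0 : PySem.Int.mod (2 * a) (a ^ 2) = pvT a 0 := by
    rw [PySem.Int.mod_eq_emod_of_pos (pv_sq_pos a ha)]; unfold pvT; norm_num
  have hfuel : pvP a + 1 ≤ a.natAbs * a.natAbs + 1 := by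
    have h1 : pvP a ≤ a.natAbs := Nat.div_le_self _ _
    have h2 : a.natAbs ≤ a.natAbs * a.natAbs := Nat.le_mul_of_pos_left _ (Int.natAbs_pos.mpr ha)
    omega
  have hrun := pvLoop_run a ha (pvP a) 0 (by omega) (a.natAbs * a.natAbs + 1) hfuel
  simp only [List.range_zero, List.map_nil] at hrun
  simp only [max_remainder]
  rw [ht0, hrun, pv_max a ha, Option.getD_some]

theorem pv_B_eq (a : Int) (ha : a ≠ 0) :
    max_remainder_alt a = 2 * a % pvG a + (a ^ 2 - pvG a) := by
  simp only [max_remainder_alt]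
  set n := a.natAbs with hn
  have hn0 : 0 < n := Int.natAbs_pos.mpr ha
  have habs : |a| = (n : Int) := Int.abs_eq_natAbs a
  have hmod2 : PySem.Int.mod |a| 2 = (n : Int) % 2 := by
    rw [PySem.Int.mod_eq_emod_of_pos (by norm_num), habs]
  have hsq : a ^ 2 = (n : Int) * n := by rw [pv_sq_eq, ← hn]
  have hgcd : Nat.gcd 4 n = Nat.gcd (n % 4) 4 := Nat.gcd_rec 4 n
  have hself : ((n : Int)) ∣ a := Int.natAbs_dvd.mpr dvd_rfl
  rcases (by omega : n % 4 = 0 ∨ n % 4 = 1 ∨ n % 4 = 2 ∨ n % 4 = 3) with h4 | h4 | h4 | h4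
  · -- n ≡ 0 mod 4 : gcd = 4, r0 = 2n
    have hd : Nat.gcd 4 n = 4 := by rw [hgcd, h4]; decide
    have heven : ¬ ((n : Int) % 2 = 1) := by omega
    rw [hmod2, if_neg heven, habs]
    have hG : pvG a = (n : Int) * 4 := by unfold pvG; rw [← hn, hd]; norm_num
    have hnpos : (0:Int) < n := by exact_mod_cast hn0
    have hr0 : 2 * a % ((n : Int) * 4) = 2 * (n : Int) := by
      rcases Int.natAbs_eq a with hae | hae
      · have hae' : a = (n : Int) := by rw [hn]; exact hae
        rw [hae']
        exact Int.emod_eq_of_lt (by positivity) (by linarith)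
      · have hae' : a = -(n : Int) := by rw [hn]; exact hae
        rw [hae']
        have h1 := Int.add_mul_emod_self_left (a := 2 * -(n:Int)) (b := (n:Int)*4) (c := 1)
        rw [← h1, show 2 * -((n:Int)) + ((n:Int)*4)*1 = 2*(n:Int) by ring]
        exact Int.emod_eq_of_lt (by positivity) (by linarith)
    rw [hG, hr0, hsq]; ring
  · -- n odd
    have hd : Nat.gcd 4 n = 1 := by rw [hgcd, h4]; decide
    have hodd : (n : Int) % 2 = 1 := by omega
    rw [hmod2, if_pos hodd, habs]
    have hG : pvG a = (n : Int) := by unfold pvG; rw [← hn, hd]; norm_num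
    have hr0 : 2 * a % ((n : Int)) = 0 :=
      Int.emod_eq_zero_of_dvd (hself.mul_left 2)
    rw [hG, hr0, hsq]; ring
  · -- n ≡ 2 mod 4 : gcd = 2, r0 = 0
    have hd : Nat.gcd 4 n = 2 := by rw [hgcd, h4]; decide
    have heven : ¬ ((n : Int) % 2 = 1) := by omega
    rw [hmod2, if_neg heven, habs]
    have hG : pvG a = (n : Int) * 2 := by unfold pvG; rw [← hn, hd]; norm_num
    have hr0 : 2 * a % ((n : Int) * 2) = 0 := by
      apply Int.emod_eq_zero_of_dvd
      obtain ⟨c, hc⟩ := hself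
      exact ⟨c, by rw [hc]; ring⟩
    rw [hG, hr0, hsq]; ring
  · -- n ≡ 3 mod 4 : odd
    have hd : Nat.gcd 4 n = 1 := by rw [hgcd, h4]; decide
    have hodd : (n : Int) % 2 = 1 := by omega
    rw [hmod2, if_pos hodd, habs]
    have hG : pvG a = (n : Int) := by unfold pvG; rw [← hn, hd]; norm_num
    have hr0 : 2 * a % ((n : Int)) = 0 :=
      Int.emod_eq_zero_of_dvd (hself.mul_left 2)
    rw [hG, hr0, hsq]; ring


-- ===== VERDICT (by name: the statement is the Claim_ definition above) =====
theorem max_remainder_spec : Claim_equal_max_remainder := by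
  intro a _ ha
  unfold Spec_max_remainder
  rw [pv_A_eq a ha, pv_B_eq a ha]
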